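-- pv_equiv track=rewrite | github.com/hanseul37/codetree-TILs | 250114/아름다운 수/beautiful-number.py | is_beautiful_number
-- ===== SOURCE A (Python) =====
-- def is_beautiful_number(num):
--     s = str(num)
--     cnt = 0
--     while cnt < len(s):
--         target = s[cnt]
--         if not ('1' <= target <= '4'):
--             return False
--         if len(s) - cnt < int(target):
--             return False
--         for _ in range(int(target)):
--             if s[cnt] != target:
--                 return False
--             cnt += 1
--     return True
-- ===== SOURCE B (Python) =====
-- def is_beautiful_number(num):
--     # Check each maximal run of equal digits: the digit must be in the allowed range and
--     # the run length must be a multiple of the digit.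
--     s = str(num)
--     n = len(s)
--     i = 0
--     while i < n:
--         ch = s[i]
--         j = i
--         while j < n and s[j] == ch:
--             j += 1
--         if not ('1' <= ch <= '4') or (j - i) % int(ch) != 0:
--             return False
--         i = j
--     return True
-- ===== Notes on version B (the rewrite author's own statement) =====
-- stated objective: alternative
-- what changed: Replaces A's greedy pointer that consumes int(target) characters at a time with an inner equality check per character by a maximal-run scan that checks each run's digit is in the allowed range and its run length is divisible by that digit.
import Mathlib
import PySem

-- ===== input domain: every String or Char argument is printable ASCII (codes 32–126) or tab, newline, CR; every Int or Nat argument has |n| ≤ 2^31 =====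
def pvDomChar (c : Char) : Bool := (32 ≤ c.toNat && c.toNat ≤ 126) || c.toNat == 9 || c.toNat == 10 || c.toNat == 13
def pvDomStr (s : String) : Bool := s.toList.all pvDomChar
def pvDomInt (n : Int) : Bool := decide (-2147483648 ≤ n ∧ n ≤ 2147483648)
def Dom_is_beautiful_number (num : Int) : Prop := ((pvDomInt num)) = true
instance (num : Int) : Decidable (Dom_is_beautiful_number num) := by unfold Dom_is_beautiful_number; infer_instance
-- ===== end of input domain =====

-- B replaces A's greedy fixed-size consumption by a maximal-run divisibility check (alternative decomposition, same cost).


-- ===== PORT A =====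
-- inner `for _ in range(int(target))` loop: returns the updated cnt, or none on `return False`.
-- (s[cnt]? = none would be Python's IndexError; it is unreachable under A's preceding length guard.)
def pvInnerA (s : List Char) (target : Char) : Nat → Nat → Option Nat
  | cnt, 0 => some cnt
  | cnt, k+1 =>
    match s[cnt]? with
    | none => none
    | some ch => if ch ≠ target then none else pvInnerA s target (cnt+1) k

-- the inner loop advances cnt by exactly its trip count (needed for the outer loop's termination)
theorem pvInnerA_some {s : List Char} {t : Char} :
    ∀ {k cnt c : Nat}, pvInnerA s t cnt k = some c → c = cnt + k := by
  intro k
  induction k with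
  | zero => intro cnt c h; simpa [pvInnerA] using h.symm
  | succ k ih =>
    intro cnt c h
    simp only [pvInnerA] at h
    cases hg : s[cnt]? with
    | none => simp [hg] at h
    | some ch =>
      rw [hg] at h
      by_cases he : ch = t
      · simp [he] at h
        have := ih h
        omega
      · simp [he] at h

-- outer `while cnt < len(s)` loop of A
def pvLoopA (s : List Char) (cnt : Nat) : Bool :=
  if h : cnt < s.length then
    let target := s[cnt]
    if ¬ ('1' ≤ target ∧ target ≤ '4') then false
    else if s.length - cnt < target.toNat - 48 then false
    else
      match hm : pvInnerA s target cnt (target.toNat - 48) with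
      | none => false
      | some c => pvLoopA s c
  else true
termination_by s.length - cnt
decreasing_by
  have hc := pvInnerA_some hm
  rename_i h1 _
  rw [not_not] at h1
  have h49 : 49 ≤ target.toNat := UInt32.le_iff_toNat_le.mp (Char.le_def.mp h1.1)
  omega

def is_beautiful_number (num : Int) : Bool :=
  pvLoopA (PySem.Int.toStr num).toList 0

-- ===== PORT B =====
-- inner `while j < n and s[j] == ch` loop of B
def pvInnerB (s : List Char) (c : Char) (j : Nat) : Nat :=
  match hg : s[j]? with
  | some x => if x = c then pvInnerB s c (j+1) else j
  | none => j
termination_by s.length - j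
decreasing_by
  obtain ⟨h1, _⟩ := List.getElem?_eq_some_iff.mp hg
  omega


-- the inner while loop never moves its pointer backwards (needed for B's outer termination)
theorem pvInnerB_ge (s : List Char) (c : Char) : ∀ j, j ≤ pvInnerB s c j := by
  intro j
  fun_induction pvInnerB s c j
  all_goals omega

-- outer `while i < n` loop of B
def pvLoopB (s : List Char) (i : Nat) : Bool :=
  if h : i < s.length then
    let ch := s[i]
    let j := pvInnerB s ch i
    if ¬ ('1' ≤ ch ∧ ch ≤ '4') then false
    else if (j - i) % (ch.toNat - 48) ≠ 0 then false
    else pvLoopB s j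
  else true
termination_by s.length - i
decreasing_by
  have hj : i + 1 ≤ pvInnerB s (s[i]) i := by
    rw [pvInnerB]
    have hg : s[i]? = some s[i] := List.getElem?_eq_some_iff.mpr ⟨h, rfl⟩
    rw [hg]
    simp only [if_pos]
    exact pvInnerB_ge s (s[i]) (i+1)
  omega

def is_beautiful_number_alt (num : Int) : Bool :=
  pvLoopB (PySem.Int.toStr num).toList 0

-- ===== PRECONDITION & SPEC =====
def Spec_is_beautiful_number (num : Int) (out : Bool) : Prop := out = is_beautiful_number_alt num
instance (num : Int) (out : Bool) : Decidable (Spec_is_beautiful_number num out) := by unfold Spec_is_beautiful_number; infer_instance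

-- ===== CLAIM (what is proved, stated in full; the proofs are below) =====
def Claim_equal_is_beautiful_number : Prop := ∀ (num : Int), Dom_is_beautiful_number num → Spec_is_beautiful_number num (is_beautiful_number num)


-- ===== LEMMAS AND PROOFS =====

-- characterisation of A's inner loop: it succeeds exactly on an in-range window of characters all equal to t
theorem pvInnerA_iff {s : List Char} {t : Char} :
    ∀ {k cnt : Nat}, cnt ≤ s.length →
    (pvInnerA s t cnt k = some (cnt + k) ↔
      (cnt + k ≤ s.length ∧ ∀ m, m < k → s[cnt + m]? = some t)) := by
  intro k
  induction k with
  | zero =>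
    intro cnt hcnt
    simp [pvInnerA, hcnt]
  | succ k ih =>
    intro cnt hcnt
    constructor
    · intro h
      simp only [pvInnerA] at h
      cases hg : s[cnt]? with
      | none => rw [hg] at h; simp at h
      | some ch =>
        rw [hg] at h
        by_cases he : ch = t
        · subst he
          simp only [ne_eq, not_true_eq_false, if_false] at h
          have hlt : cnt < s.length := (List.getElem?_eq_some_iff.mp hg).1
          have h' : pvInnerA s ch (cnt + 1) k = some ((cnt + 1) + k) := by
            rw [h]; congr 1; omega
          obtain ⟨h1, h2⟩ := (ih (by omega)).mp h'
          refine ⟨by omega, ?_⟩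
          intro m hm
          cases m with
          | zero => simpa using hg
          | succ m =>
            have h3 := h2 m (by omega)
            simpa [Nat.add_comm, Nat.add_left_comm, Nat.add_assoc] using h3
        · simp [he] at h
    · rintro ⟨h1, h2⟩
      have h0 := h2 0 (by omega)
      simp only [Nat.add_zero] at h0
      simp only [pvInnerA, h0, ne_eq, not_true_eq_false, if_false]
      have h' : pvInnerA s t (cnt + 1) k = some ((cnt + 1) + k) := by
        refine (ih (by have := (List.getElem?_eq_some_iff.mp h0).1; omega)).mpr ⟨by omega, ?_⟩
        intro m hm
        have h3 := h2 (m + 1) (by omega)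
        simpa [Nat.add_comm, Nat.add_left_comm, Nat.add_assoc] using h3
      rw [h']; congr 1; omega

-- digit bounds extracted from the range check '1' <= c <= '4'
theorem pvDigitBounds {c : Char} (hc : '1' ≤ c ∧ c ≤ '4') :
    49 ≤ c.toNat ∧ c.toNat ≤ 52 :=
  ⟨UInt32.le_iff_toNat_le.mp (Char.le_def.mp hc.1),
   UInt32.le_iff_toNat_le.mp (Char.le_def.mp hc.2)⟩

-- subtracting one chunk does not change the remainder
theorem pvSubMod (t r : Nat) (h1 : 1 ≤ t) (h4 : t ≤ 4) (htr : t ≤ r) :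
    (r - t) % t = r % t := by
  interval_cases t <;> omega

-- A's outer loop across one maximal run of c of length r: it consumes the run in chunks of
-- int(c) and survives it exactly when int(c) divides r
theorem pvLoopA_run (s : List Char) (c : Char) (hc : '1' ≤ c ∧ c ≤ '4') :
    ∀ r i, i + r ≤ s.length →
    (∀ m, m < r → s[i + m]? = some c) →
    (i + r = s.length ∨ s[i + r]? ≠ some c) →
    pvLoopA s i = if r % (c.toNat - 48) = 0 then pvLoopA s (i + r) else false := by
  obtain ⟨hl, hu⟩ := pvDigitBounds hc
  intro r
  induction r using Nat.strong_induction_on with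
  | _ r IH =>
  intro i hir hall hend
  rcases Nat.eq_zero_or_pos r with hr0 | hrpos
  · subst hr0
    simp
  · have hi : i < s.length := by
      have := (List.getElem?_eq_some_iff.mp (hall 0 hrpos)).1
      omega
    have hsi : s[i] = c := by
      have := hall 0 hrpos
      simp only [Nat.add_zero] at this
      exact (List.getElem?_eq_some_iff.mp this).2
    subst hsi
    rw [pvLoopA, dif_pos hi]
    simp only [if_neg (not_not_intro hc)]
    by_cases hlt : s.length - i < (s[i]).toNat - 48
    · rw [if_pos hlt]
      have hrt : r < (s[i]).toNat - 48 := by omega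
      rw [if_neg (by rw [Nat.mod_eq_of_lt hrt]; omega)]
    · rw [if_neg hlt]
      by_cases htr : (s[i]).toNat - 48 ≤ r
      · have hsome : pvInnerA s (s[i]) i ((s[i]).toNat - 48) = some (i + ((s[i]).toNat - 48)) := by
          refine (pvInnerA_iff (by omega)).mpr ⟨by omega, ?_⟩
          intro m hm
          exact hall m (by omega)
        split
        · rename_i heq
          rw [hsome] at heq
          exact absurd heq (by simp)
        · rename_i x heq
          rw [hsome] at heq
          have hx : x = i + ((s[i]).toNat - 48) := by
            injection heq with h; exact h.symm
          subst hx
          have hrec := IH (r - ((s[i]).toNat - 48)) (by omega) (i + ((s[i]).toNat - 48))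
            (by omega)
            (by
              intro m hm
              have h3 := hall (((s[i]).toNat - 48) + m) (by omega)
              simpa [Nat.add_comm, Nat.add_left_comm, Nat.add_assoc] using h3)
            (by
              have heq2 : i + ((s[i]).toNat - 48) + (r - ((s[i]).toNat - 48)) = i + r := by omega
              rw [heq2]
              exact hend)
          rw [hrec]
          rw [pvSubMod _ _ (by omega) (by omega) htr]
          have heq2 : i + ((s[i]).toNat - 48) + (r - ((s[i]).toNat - 48)) = i + r := by omega
          rw [heq2]
      · -- r < int(c): the window of length int(c) crosses the end of the run, so the inner loop fails
        have hnone : pvInnerA s (s[i]) i ((s[i]).toNat - 48) = none := by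
          cases hres : pvInnerA s (s[i]) i ((s[i]).toNat - 48) with
          | none => rfl
          | some x =>
            have hx := pvInnerA_some hres
            subst hx
            obtain ⟨_, hallw⟩ := (pvInnerA_iff (by omega)).mp hres
            have hw := hallw r (by omega)
            rcases hend with hE | hE
            · omega
            · exact absurd hw hE
        split
        · rw [if_neg (by rw [Nat.mod_eq_of_lt (by omega)]; omega)]
        · rename_i x heq
          rw [hnone] at heq
          exact absurd heq (by simp)

-- characterisation of B's inner loop: it returns the end of the maximal run of c starting at i
theorem pvInnerB_spec (s : List Char) (c : Char) :
    ∀ i, i ≤ s.length →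
    i ≤ pvInnerB s c i ∧ pvInnerB s c i ≤ s.length ∧
    (∀ m, i ≤ m → m < pvInnerB s c i → s[m]? = some c) ∧
    (pvInnerB s c i = s.length ∨ s[pvInnerB s c i]? ≠ some c) := by
  intro i
  fun_induction pvInnerB s c i with
  | case1 j hg ih =>
    intro hj
    have hjlt : j < s.length := (List.getElem?_eq_some_iff.mp hg).1
    obtain ⟨ih1, ih2, ih3, ih4⟩ := ih (by omega)
    refine ⟨by omega, ih2, ?_, ih4⟩
    intro m hm1 hm2
    rcases Nat.eq_or_lt_of_le hm1 with hme | hml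
    · rw [← hme]; exact hg
    · exact ih3 m hml hm2
  | case2 j x hg hx =>
    intro hj
    refine ⟨le_refl _, hj, by intro m h1 h2; omega, Or.inr ?_⟩
    rw [hg]
    simp [hx]
  | case3 j hg =>
    intro hj
    have := List.getElem?_eq_none_iff.mp hg
    exact ⟨le_refl _, hj, by intro m h1 h2; omega, Or.inl (by omega)⟩

-- main loop equivalence, by fuel induction on the remaining length
theorem pvLoopAB (s : List Char) :
    ∀ n i, i ≤ s.length → s.length - i ≤ n → pvLoopA s i = pvLoopB s i := by
  intro n
  induction n with
  | zero =>
    intro i hi hn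
    have : i = s.length := by omega
    subst this
    rw [pvLoopA, pvLoopB, dif_neg (lt_irrefl _), dif_neg (lt_irrefl _)]
  | succ n IH =>
    intro i hi hn
    rcases Nat.lt_or_ge i s.length with hilt | hige
    · obtain ⟨hj1, hj2, hj3, hj4⟩ := pvInnerB_spec s (s[i]) i (by omega)
      have hij : i < pvInnerB s (s[i]) i := by
        rcases Nat.eq_or_lt_of_le hj1 with he | hl
        · exfalso
          rcases hj4 with h4 | h4
          · omega
          · apply h4
            rw [← he]
            exact List.getElem?_eq_some_iff.mpr ⟨hilt, rfl⟩
        · exact hl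
      by_cases hv : '1' ≤ s[i] ∧ s[i] ≤ '4'
      · have hrun := pvLoopA_run s (s[i]) hv (pvInnerB s (s[i]) i - i) i
          (by omega)
          (by
            intro m hm
            exact hj3 (i + m) (by omega) (by omega))
          (by
            have heq2 : i + (pvInnerB s (s[i]) i - i) = pvInnerB s (s[i]) i := by omega
            rw [heq2]
            exact hj4)
        have heq2 : i + (pvInnerB s (s[i]) i - i) = pvInnerB s (s[i]) i := by omega
        rw [heq2] at hrun
        rw [hrun, pvLoopB, dif_pos hilt]
        simp only [if_neg (not_not_intro hv)]
        by_cases hmod : (pvInnerB s (s[i]) i - i) % ((s[i]).toNat - 48) = 0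
        · rw [if_pos hmod, if_neg (by simp [hmod])]
          exact IH (pvInnerB s (s[i]) i) (by omega) (by omega)
        · rw [if_neg hmod, if_pos (by simp [hmod])]
      · rw [pvLoopA, pvLoopB, dif_pos hilt, dif_pos hilt]
        simp [hv]
    · rw [pvLoopA, pvLoopB, dif_neg (by omega), dif_neg (by omega)]

-- ===== VERDICT (by name: the statement is the Claim_ definition above) =====
theorem is_beautiful_number_spec : Claim_equal_is_beautiful_number := by
  intro num _
  unfold Spec_is_beautiful_number is_beautiful_number is_beautiful_number_alt
  exact pvLoopAB _ ((PySem.Int.toStr num).toList.length) 0 (Nat.zero_le _) (by omega)
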